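-- pv_equiv track=rewrite | github.com/prig18032-code/algograss | backend/scanner_api.py | compute_overall_risk
-- ===== SOURCE A (Python) =====
-- def compute_overall_risk(table_risks: dict) -> str:
--     """
--     Aggregate per-table risk into a single overall risk level.
--     Priority: high > medium > low > none.
--     """
--     levels = [info.get("risk_level", "none") for info in table_risks.values()]
--
--     if any(l == "high" for l in levels):
--         return "high"
--     if any(l == "medium" for l in levels):
--         return "medium"
--     if any(l == "low" for l in levels):
--         return "low"
--     return "none"
-- ===== SOURCE B (Python) =====
-- _RANK = {"high": 3, "medium": 2, "low": 1}
-- _NAMES = ["none", "low", "medium", "high"]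
--
-- def compute_overall_risk(table_risks: dict) -> str:
--     best = max((_RANK.get(info.get("risk_level", "none"), 0)
--                 for info in table_risks.values()), default=0)
--     return _NAMES[best]
-- ===== Notes on version B (the rewrite author's own statement) =====
-- stated objective: simpler
-- what changed: Replaces the three priority-ordered any() scans over the levels list with a single max pass over a numeric rank table, then indexes a name list by the best rank.
import Mathlib
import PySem

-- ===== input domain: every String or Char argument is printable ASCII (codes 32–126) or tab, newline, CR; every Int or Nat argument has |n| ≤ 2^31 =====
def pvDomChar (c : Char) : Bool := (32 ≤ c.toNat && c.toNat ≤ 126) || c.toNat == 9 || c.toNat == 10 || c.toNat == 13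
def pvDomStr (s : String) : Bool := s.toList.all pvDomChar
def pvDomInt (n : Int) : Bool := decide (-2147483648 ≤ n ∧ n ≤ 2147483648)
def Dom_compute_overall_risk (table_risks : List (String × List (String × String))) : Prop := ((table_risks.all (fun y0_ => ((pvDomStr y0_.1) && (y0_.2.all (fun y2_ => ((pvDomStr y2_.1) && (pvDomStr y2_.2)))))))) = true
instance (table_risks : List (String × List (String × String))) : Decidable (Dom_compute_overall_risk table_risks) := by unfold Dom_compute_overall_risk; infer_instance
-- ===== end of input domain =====

-- B replaces A's three priority-ordered any() scans with one max pass over a numeric rank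
-- table followed by indexing a name list (objective: simpler; same values everywhere).

-- ===== PORT A =====
-- info.get("risk_level", "none"): first-match lookup in the association list (dict convention)
def pvLevel (info : List (String × String)) : String :=
  ((info.find? (fun kv => kv.1 == "risk_level")).map (·.2)).getD "none"

def compute_overall_risk (table_risks : List (String × List (String × String))) : String :=
  let levels := table_risks.map (fun kv => pvLevel kv.2)
  if levels.any (fun l => l == "high") then "high"
  else if levels.any (fun l => l == "medium") then "medium"
  else if levels.any (fun l => l == "low") then "low"
  else "none"

-- ===== PORT B =====
-- _RANK.get(l, 0)
def pvRank (l : String) : Nat :=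
  if l = "high" then 3 else if l = "medium" then 2 else if l = "low" then 1 else 0

def pvNames : List String := ["none", "low", "medium", "high"]

def compute_overall_risk_alt (table_risks : List (String × List (String × String))) : String :=
  let best := table_risks.foldl (fun acc kv => max acc (pvRank (pvLevel kv.2))) 0
  pvNames.getD best "none"

-- ===== PRECONDITION & SPEC =====
def Spec_compute_overall_risk (table_risks : List (String × List (String × String))) (out : String) : Prop := out = compute_overall_risk_alt table_risks
instance (table_risks : List (String × List (String × String))) (out : String) : Decidable (Spec_compute_overall_risk table_risks out) := by unfold Spec_compute_overall_risk; infer_instance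

-- ===== CLAIM (what is proved, stated in full; the proofs are below) =====
def Claim_equal_compute_overall_risk : Prop := ∀ (table_risks : List (String × List (String × String))), Dom_compute_overall_risk table_risks → Spec_compute_overall_risk table_risks (compute_overall_risk table_risks)

-- ===== LEMMAS AND PROOFS =====

-- the maximum rank of a list of level strings (B's fold, over the levels list)
def pvMaxRank (L : List String) : Nat := L.foldl (fun a l => max a (pvRank l)) 0

theorem pvFold_shift (L : List String) (a : Nat) :
    L.foldl (fun a l => max a (pvRank l)) a = max a (pvMaxRank L) := by
  induction L generalizing a with
  | nil => simp [pvMaxRank]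
  | cons l L ih =>
    simp only [List.foldl_cons, pvMaxRank] at *
    rw [ih, ih (max 0 (pvRank l))]
    omega

theorem pvMaxRank_cons (l : String) (L : List String) :
    pvMaxRank (l :: L) = max (pvRank l) (pvMaxRank L) := by
  show List.foldl (fun a l => max a (pvRank l)) (max 0 (pvRank l)) L = _
  rw [pvFold_shift]
  omega

theorem pvMaxRank_le (L : List String) : pvMaxRank L ≤ 3 := by
  induction L with
  | nil => simp [pvMaxRank]
  | cons l L ih =>
    rw [pvMaxRank_cons]
    have hr : pvRank l ≤ 3 := by unfold pvRank; split_ifs <;> omega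
    omega

theorem pvAny_ge (L : List String) (k : Nat) (hk : 1 ≤ k) :
    (L.any (fun l => k ≤ pvRank l)) = true ↔ k ≤ pvMaxRank L := by
  induction L with
  | nil => simp [pvMaxRank]; omega
  | cons l L ih =>
    rw [pvMaxRank_cons]
    simp only [List.any_cons, Bool.or_eq_true, decide_eq_true_eq, ih]
    omega

theorem pvAny_rank (L : List String) (k : Nat) (hk : 1 ≤ k) (p : String → Bool)
    (hp : ∀ l, p l = true ↔ k ≤ pvRank l) :
    (L.any p) = true ↔ k ≤ pvMaxRank L := by
  rw [← pvAny_ge L k hk]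
  constructor
  · intro h
    rcases List.any_eq_true.1 h with ⟨x, hx, hpx⟩
    exact List.any_eq_true.2 ⟨x, hx, by simp [(hp x).1 hpx]⟩
  · intro h
    rcases List.any_eq_true.1 h with ⟨x, hx, hpx⟩
    exact List.any_eq_true.2 ⟨x, hx, (hp x).2 (by simpa using hpx)⟩

theorem pv_high (l : String) : ((l == "high") = true) ↔ 3 ≤ pvRank l := by
  unfold pvRank; split_ifs <;> simp_all
theorem pv_med (l : String) : ((l == "medium") = true) ↔ (2 ≤ pvRank l ∧ ¬ 3 ≤ pvRank l) := by
  unfold pvRank; split_ifs <;> simp_all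
theorem pv_low (l : String) : ((l == "low") = true) ↔ (1 ≤ pvRank l ∧ ¬ 2 ≤ pvRank l) := by
  unfold pvRank; split_ifs <;> simp_all

-- ===== VERDICT (by name: the statement is the Claim_ definition above) =====
theorem compute_overall_risk_spec : Claim_equal_compute_overall_risk := by
  intro tr _
  unfold Spec_compute_overall_risk compute_overall_risk compute_overall_risk_alt
  have hfold : tr.foldl (fun acc kv => max acc (pvRank (pvLevel kv.2))) 0
      = pvMaxRank (tr.map (fun kv => pvLevel kv.2)) := by
    simp [pvMaxRank, List.foldl_map]
  rw [hfold]
  set L := tr.map (fun kv => pvLevel kv.2) with hL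
  have hle := pvMaxRank_le L
  by_cases h3 : (L.any (fun l => l == "high")) = true
  · have : 3 ≤ pvMaxRank L := (pvAny_rank L 3 (by omega) _ pv_high).1 h3
    have hM : pvMaxRank L = 3 := by omega
    simp [h3, hM, pvNames]
  · have n3 : ¬ 3 ≤ pvMaxRank L := fun h =>
      h3 ((pvAny_rank L 3 (by omega) _ pv_high).2 h)
    by_cases h2 : (L.any (fun l => l == "medium")) = true
    · rcases List.any_eq_true.1 h2 with ⟨x, hx, hpx⟩
      have : 2 ≤ pvRank x := ((pv_med x).1 hpx).1
      have hge : 2 ≤ pvMaxRank L := by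
        rw [← pvAny_ge L 2 (by omega)]
        exact List.any_eq_true.2 ⟨x, hx, by simpa using this⟩
      have hM : pvMaxRank L = 2 := by omega
      simp [h3, h2, hM, pvNames]
    · by_cases h1 : (L.any (fun l => l == "low")) = true
      · rcases List.any_eq_true.1 h1 with ⟨x, hx, hpx⟩
        have : 1 ≤ pvRank x := ((pv_low x).1 hpx).1
        have hge : 1 ≤ pvMaxRank L := by
          rw [← pvAny_ge L 1 (by omega)]
          exact List.any_eq_true.2 ⟨x, hx, by simpa using this⟩
        have n2 : ¬ 2 ≤ pvMaxRank L := by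
          intro h
          rcases List.any_eq_true.1 ((pvAny_ge L 2 (by omega)).2 h) with ⟨y, hy, hpy⟩
          have h2y : 2 ≤ pvRank y := by simpa using hpy
          by_cases h3y : 3 ≤ pvRank y
          · exact h3 (List.any_eq_true.2 ⟨y, hy, (pv_high y).2 h3y⟩)
          · exact h2 (List.any_eq_true.2 ⟨y, hy, (pv_med y).2 ⟨h2y, h3y⟩⟩)
        have hM : pvMaxRank L = 1 := by omega
        simp [h3, h2, h1, hM, pvNames]
      · have n1 : ¬ 1 ≤ pvMaxRank L := by
          intro h
          rcases List.any_eq_true.1 ((pvAny_ge L 1 (by omega)).2 h) with ⟨y, hy, hpy⟩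
          have h1y : 1 ≤ pvRank y := by simpa using hpy
          by_cases h3y : 3 ≤ pvRank y
          · exact h3 (List.any_eq_true.2 ⟨y, hy, (pv_high y).2 h3y⟩)
          by_cases h2y : 2 ≤ pvRank y
          · exact h2 (List.any_eq_true.2 ⟨y, hy, (pv_med y).2 ⟨h2y, h3y⟩⟩)
          · exact h1 (List.any_eq_true.2 ⟨y, hy, (pv_low y).2 ⟨h1y, h2y⟩⟩)
        have hM : pvMaxRank L = 0 := by omega
        simp [h3, h2, h1, hM, pvNames]
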